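-- pv_equiv track=rewrite | github.com/anaconda-distribution/conda-concourse-ci | utils/Rcran/genRcranUpdate.py | bld_feedstocks_lines
-- ===== SOURCE A (Python) =====
-- do_max_pkg_cnt = 100 # set to -1 if all packages shall be done
--
-- RrepositoryName = 'aggregateR'
--
-- batch_count_max=100
--
-- def bld_feedstocks_lines(stages):
--     rslt = ''
--     cnt = do_max_pkg_cnt
--     for i, stage in enumerate(stages):
--         scount = len(stage)
--         j = 0
--         elno = 0
--         while elno < scount and (cnt == -1 or cnt > 0):
--             el = 0
--             while elno < scount and el < batch_count_max and (cnt == -1 or cnt > 0):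
--                 p = stage[elno]
--                 rslt += '         {}/r-{}-feedstock\n'.format(RrepositoryName, p)
--                 elno += 1
--                 el += 1
--                 if cnt != -1:
--                     cnt -= 1
--             j += 1
--         if cnt == 0:
--             break
--     # end for
--     return rslt
-- ===== SOURCE B (Python) =====
-- from itertools import chain, islice
--
-- do_max_pkg_cnt = 100 # set to -1 if all packages shall be done
--
-- RrepositoryName = 'aggregateR'
--
-- batch_count_max = 100
--
-- def bld_feedstocks_lines(stages):
--     stream = chain.from_iterable(stages)
--     if do_max_pkg_cnt != -1:
--         stream = islice(stream, do_max_pkg_cnt)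
--     return ''.join('         {}/r-{}-feedstock\n'.format(RrepositoryName, p)
--                    for p in stream)
-- ===== Notes on version B (the rewrite author's own statement) =====
-- stated objective: simpler
-- what changed: Replaced the nested batching while-loops with index/counter arithmetic by a flatten-slice-join pipeline: chain the stages into one stream, islice the first do_max_pkg_cnt packages (all if -1), and join the formatted lines.
import Mathlib
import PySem

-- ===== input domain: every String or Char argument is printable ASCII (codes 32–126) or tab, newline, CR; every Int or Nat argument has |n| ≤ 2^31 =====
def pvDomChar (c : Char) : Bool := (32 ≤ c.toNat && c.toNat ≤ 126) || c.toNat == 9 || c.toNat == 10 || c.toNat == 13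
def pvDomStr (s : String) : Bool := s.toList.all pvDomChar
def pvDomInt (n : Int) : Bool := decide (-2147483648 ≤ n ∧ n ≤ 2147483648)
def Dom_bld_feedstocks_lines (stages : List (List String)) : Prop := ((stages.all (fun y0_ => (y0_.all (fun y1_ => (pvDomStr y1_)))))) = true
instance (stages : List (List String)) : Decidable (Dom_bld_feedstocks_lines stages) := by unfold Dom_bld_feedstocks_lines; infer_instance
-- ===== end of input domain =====

-- B replaces A's nested batching while-loops and counter arithmetic by a
-- flatten-take-join pipeline (simpler decomposition, same cost).


-- module constants
def pvDoMaxPkgCnt : Int := 100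
def pvRrepositoryName : String := "aggregateR"
def pvBatchCountMax : Int := 100

-- ===== PORT A =====
-- inner while: 'while elno < scount and el < batch_count_max and (cnt == -1 or cnt > 0)'.
-- The loop is encoded structurally on a fuel that bounds the remaining iterations
-- (each iteration increments elno, so 'scount - elno' many suffice; when fuel is 0
-- the guard is already false for every reachable state).  stage[elno] is in range
-- whenever the guard holds (0 ≤ elno < scount), so pyGetD's default is never used.
def pvInnerLoop (stage : List String) (scount : Int) :
    Nat → String → Int → Int → Int → String × Int × Int
  | 0, rslt, elno, _el, cnt => (rslt, elno, cnt)
  | fuel + 1, rslt, elno, el, cnt =>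
    if elno < scount ∧ el < pvBatchCountMax ∧ (cnt = -1 ∨ 0 < cnt) then
      let p := PySem.List.pyGetD stage elno ""
      pvInnerLoop stage scount fuel
        (rslt ++ ("         " ++ pvRrepositoryName ++ "/r-" ++ p ++ "-feedstock\n"))
        (elno + 1) (el + 1) (if cnt ≠ -1 then cnt - 1 else cnt)
    else (rslt, elno, cnt)

-- outer while: 'while elno < scount and (cnt == -1 or cnt > 0)' (j counts batches);
-- every iteration with a true guard consumes at least one element, so the same fuel bound works.
def pvBatchLoop (stage : List String) (scount : Int) :
    Nat → String → Int → Int → Int → String × Int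
  | 0, rslt, _, _, cnt => (rslt, cnt)
  | fuel + 1, rslt, elno, j, cnt =>
    if elno < scount ∧ (cnt = -1 ∨ 0 < cnt) then
      let r := pvInnerLoop stage scount (scount - elno).toNat rslt elno 0 cnt
      pvBatchLoop stage scount fuel r.1 r.2.1 (j + 1) r.2.2
    else (rslt, cnt)

-- the for loop over stages, with the 'if cnt == 0: break'
def pvStagesLoop (stages : List (List String)) (rslt : String) (cnt : Int) : String :=
  match stages with
  | [] => rslt
  | stage :: rest =>
    let scount : Int := stage.length
    let r := pvBatchLoop stage scount scount.toNat rslt 0 0 cnt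
    if r.2 = 0 then r.1 else pvStagesLoop rest r.1 r.2

def bld_feedstocks_lines (stages : List (List String)) : String :=
  pvStagesLoop stages "" pvDoMaxPkgCnt

-- ===== PORT B =====
def bld_feedstocks_lines_alt (stages : List (List String)) : String :=
  let stream := stages.flatten
  let sel := if pvDoMaxPkgCnt ≠ -1 then stream.take pvDoMaxPkgCnt.toNat else stream
  String.join (sel.map (fun p =>
    "         " ++ pvRrepositoryName ++ "/r-" ++ p ++ "-feedstock\n"))

-- ===== PRECONDITION & SPEC =====
def Spec_bld_feedstocks_lines (stages : List (List String)) (out : String) : Prop := out = bld_feedstocks_lines_alt stages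
instance (stages : List (List String)) (out : String) : Decidable (Spec_bld_feedstocks_lines stages out) := by unfold Spec_bld_feedstocks_lines; infer_instance

-- ===== CLAIM (what is proved, stated in full; the proofs are below) =====
def Claim_equal_bld_feedstocks_lines : Prop := ∀ (stages : List (List String)), Dom_bld_feedstocks_lines stages → Spec_bld_feedstocks_lines stages (bld_feedstocks_lines stages)

-- ===== LEMMAS AND PROOFS =====

def pvFmt (p : String) : String :=
  "         " ++ pvRrepositoryName ++ "/r-" ++ p ++ "-feedstock\n"

def pvJoinFmt (l : List String) : String := String.join (l.map pvFmt)

theorem pv_join_cons (s : String) (l : List String) :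
    String.join (s :: l) = s ++ String.join l := by
  have gen : ∀ (l : List String) (a : String), l.foldl (· ++ ·) a = a ++ String.join l := by
    intro l
    induction l with
    | nil => intro a; simp [String.join]
    | cons x xs ih =>
      intro a
      simp only [String.join, List.foldl_cons] at *
      rw [ih (a ++ x), ih ("" ++ x), String.empty_append, String.append_assoc]
  simpa [String.join] using gen l s

theorem pvJoinFmt_nil : pvJoinFmt [] = "" := rfl

theorem pvJoinFmt_cons (p : String) (l : List String) :
    pvJoinFmt (p :: l) = pvFmt p ++ pvJoinFmt l := by
  simp [pvJoinFmt, pv_join_cons]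

theorem pvJoinFmt_append (a b : List String) :
    pvJoinFmt (a ++ b) = pvJoinFmt a ++ pvJoinFmt b := by
  induction a with
  | nil => simp [pvJoinFmt_nil]
  | cons x xs ih => rw [List.cons_append, pvJoinFmt_cons, pvJoinFmt_cons, ih, String.append_assoc]

-- characterisation of the inner (batch) while loop
theorem pvInnerLoop_spec (stage : List String) :
    ∀ (fuel : Nat) (rslt : String) (elno el cnt : Int),
      ((stage.length : Int) - elno).toNat ≤ fuel →
      0 ≤ elno → elno ≤ (stage.length : Int) → 0 ≤ el → el ≤ 100 → 0 ≤ cnt →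
      pvInnerLoop stage (stage.length : Int) fuel rslt elno el cnt =
        (rslt ++ pvJoinFmt ((stage.drop elno.toNat).take
            (min (min ((stage.length : Int) - elno) (100 - el)) cnt).toNat),
         elno + min (min ((stage.length : Int) - elno) (100 - el)) cnt,
         cnt - min (min ((stage.length : Int) - elno) (100 - el)) cnt) := by
  intro fuel
  induction fuel with
  | zero =>
    intro rslt elno el cnt hf h0 h1 h2 h3 h4
    have hz : min (min ((stage.length : Int) - elno) (100 - el)) cnt = 0 := by omega
    rw [pvInnerLoop, hz]
    simp [pvJoinFmt_nil, String.append_empty]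
  | succ fuel ih =>
    intro rslt elno el cnt hf h0 h1 h2 h3 h4
    rw [pvInnerLoop]
    by_cases hg : elno < (stage.length : Int) ∧ el < pvBatchCountMax ∧ (cnt = -1 ∨ 0 < cnt)
    · rw [if_pos hg]
      obtain ⟨hg1, hg2, hg3⟩ := hg
      unfold pvBatchCountMax at hg2
      have hcnt : 0 < cnt := by omega
      have hne : cnt ≠ -1 := by omega
      rw [if_pos hne]
      have hget := PySem.List.pyGetD_eq_getElem stage "" h0 hg1
      set m := min (min ((stage.length : Int) - elno) (100 - el)) cnt with hm
      have hm1 : 1 ≤ m := by omega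
      rw [ih _ (elno + 1) (el + 1) (cnt - 1) (by omega) (by omega) (by omega) (by omega)
        (by omega) (by omega)]
      have hmm : min (min ((stage.length : Int) - (elno + 1)) (100 - (el + 1))) (cnt - 1)
          = m - 1 := by omega
      rw [hmm]
      have hdrop : stage.drop elno.toNat
          = stage[elno.toNat]'(by omega) :: stage.drop (elno.toNat + 1) :=
        List.drop_eq_getElem_cons (by omega)
      have helno1 : (elno + 1).toNat = elno.toNat + 1 := by omega
      have hmt : m.toNat = (m - 1).toNat + 1 := by omega
      refine Prod.ext ?_ (Prod.ext (by simp) (by simp))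
      simp only [helno1]
      rw [hdrop, hmt, List.take_succ_cons, pvJoinFmt_cons, hget]
      simp only [pvFmt, String.append_assoc]
    · rw [if_neg hg]
      unfold pvBatchCountMax at hg
      have hz : min (min ((stage.length : Int) - elno) (100 - el)) cnt = 0 := by omega
      rw [hz]
      simp [pvJoinFmt_nil, String.append_empty]

-- characterisation of the outer while loop
theorem pvBatchLoop_spec (stage : List String) :
    ∀ (fuel : Nat) (rslt : String) (elno j cnt : Int),
      ((stage.length : Int) - elno).toNat ≤ fuel →
      0 ≤ elno → elno ≤ (stage.length : Int) → 0 ≤ cnt →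
      pvBatchLoop stage (stage.length : Int) fuel rslt elno j cnt =
        (rslt ++ pvJoinFmt ((stage.drop elno.toNat).take
            (min ((stage.length : Int) - elno) cnt).toNat),
         cnt - min ((stage.length : Int) - elno) cnt) := by
  intro fuel
  induction fuel with
  | zero =>
    intro rslt elno j cnt hf h0 h1 h4
    have hz : min ((stage.length : Int) - elno) cnt = 0 := by omega
    rw [pvBatchLoop, hz]
    simp [pvJoinFmt_nil, String.append_empty]
  | succ fuel ih =>
    intro rslt elno j cnt hf h0 h1 h4
    rw [pvBatchLoop]
    by_cases hg : elno < (stage.length : Int) ∧ (cnt = -1 ∨ 0 < cnt)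
    · rw [if_pos hg]
      obtain ⟨hg1, hg3⟩ := hg
      have hcnt : 0 < cnt := by omega
      rw [pvInnerLoop_spec stage (((stage.length : Int) - elno).toNat) rslt elno 0 cnt
        (le_refl _) h0 h1 (by omega) (by omega) (by omega)]
      set m := min (min ((stage.length : Int) - elno) (100 - 0)) cnt with hm
      have hm1 : 1 ≤ m := by omega
      have hmM : m ≤ min ((stage.length : Int) - elno) cnt := by omega
      rw [ih _ (elno + m) (j + 1) (cnt - m) (by omega) (by omega) (by omega) (by omega)]
      have hmm : min ((stage.length : Int) - (elno + m)) (cnt - m)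
          = min ((stage.length : Int) - elno) cnt - m := by omega
      rw [hmm]
      set M := min ((stage.length : Int) - elno) cnt with hM
      refine Prod.ext ?_ (by simp)
      have hsplit : (stage.drop elno.toNat).take M.toNat
          = (stage.drop elno.toNat).take m.toNat
            ++ ((stage.drop elno.toNat).drop m.toNat).take (M - m).toNat := by
        have : M.toNat = m.toNat + (M - m).toNat := by omega
        rw [this, List.take_add]
      have hdd : (stage.drop elno.toNat).drop m.toNat = stage.drop (elno + m).toNat := by
        rw [List.drop_drop]
        congr 1
        omega
      simp only []
      rw [hsplit, hdd, pvJoinFmt_append, String.append_assoc]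
    · rw [if_neg hg]
      have hz : min ((stage.length : Int) - elno) cnt = 0 := by omega
      rw [hz]
      simp [pvJoinFmt_nil, String.append_empty]

-- characterisation of the for loop
theorem pvStagesLoop_spec :
    ∀ (stages : List (List String)) (rslt : String) (cnt : Int), 0 ≤ cnt →
      pvStagesLoop stages rslt cnt = rslt ++ pvJoinFmt (stages.flatten.take cnt.toNat) := by
  intro stages
  induction stages with
  | nil => intro rslt cnt h; simp [pvStagesLoop, pvJoinFmt_nil, String.append_empty]
  | cons stage rest ih =>
    intro rslt cnt h
    rw [pvStagesLoop]
    rw [pvBatchLoop_spec stage ((stage.length : Int)).toNat rslt 0 0 cnt (by omega)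
      (by omega) (by omega) h]
    simp only [Int.sub_zero, Int.toNat_zero, List.drop_zero]
    set L : Int := (stage.length : Int) with hL
    by_cases hz : cnt - min L cnt = 0
    · rw [if_pos hz]
      have hcle : cnt ≤ L := by omega
      have hmin : min L cnt = cnt := by omega
      rw [hmin, List.flatten_cons,
        List.take_append_of_le_length (by omega : cnt.toNat ≤ stage.length)]
    · rw [if_neg hz]
      have hlt : L < cnt := by omega
      have hmin : min L cnt = L := by omega
      rw [hmin, ih _ (cnt - L) (by omega), List.flatten_cons, List.take_append]
      rw [List.take_of_length_le (by omega : stage.length ≤ cnt.toNat)]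
      have : cnt.toNat - stage.length = (cnt - L).toNat := by omega
      rw [this, pvJoinFmt_append, String.append_assoc,
        show L.toNat = stage.length by omega, List.take_length]

-- ===== VERDICT (by name: the statement is the Claim_ definition above) =====
theorem bld_feedstocks_lines_spec : Claim_equal_bld_feedstocks_lines := by
  intro stages _
  unfold Spec_bld_feedstocks_lines bld_feedstocks_lines bld_feedstocks_lines_alt
  rw [pvStagesLoop_spec stages "" pvDoMaxPkgCnt (by decide), String.empty_append]
  rfl
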